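-- pv_equiv track=rewrite | github.com/xriva/coding-contest | google/kickstart/2020/F/ATM/atm.py | solve
-- ===== SOURCE A (Python) =====
-- from collections import defaultdict
--
-- def solve(N,X,A):
--     temp = defaultdict(list)
--     for i in range(N):
--         n = (A[i]-1)//X
--         temp[n].append(str(i+1))
--
--     result =[]
--     for k in sorted(temp.keys()):
--         result.extend(temp[k])
--     return ' '.join(result)
-- ===== SOURCE B (Python) =====
-- def solve(N, X, A):
--     order = sorted(range(N), key=lambda i: (A[i] - 1) // X)
--     return ' '.join(str(i + 1) for i in order)
-- ===== Notes on version B (the rewrite author's own statement) =====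
-- stated objective: simpler
-- what changed: Drops the defaultdict bucket table and the group-then-concatenate pass: B stable-sorts the index list once by the key (A[i]-1)//X and joins it directly.
import Mathlib
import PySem

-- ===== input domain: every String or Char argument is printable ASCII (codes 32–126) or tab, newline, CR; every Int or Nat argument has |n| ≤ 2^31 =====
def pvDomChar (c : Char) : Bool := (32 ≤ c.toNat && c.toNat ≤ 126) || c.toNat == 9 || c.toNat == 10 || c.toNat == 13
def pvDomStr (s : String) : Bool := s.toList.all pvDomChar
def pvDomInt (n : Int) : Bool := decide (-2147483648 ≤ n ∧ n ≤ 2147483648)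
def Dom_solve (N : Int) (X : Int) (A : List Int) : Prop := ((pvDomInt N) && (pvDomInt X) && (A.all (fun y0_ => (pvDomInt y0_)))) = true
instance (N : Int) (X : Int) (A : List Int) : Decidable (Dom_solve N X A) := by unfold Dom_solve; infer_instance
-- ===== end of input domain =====

-- B replaces A's defaultdict bucket table and group-concatenation by one stable sort
-- of the indices by the key (A[i]-1)//X (objective: simpler).

-- ===== PORT A =====
def solve (N : Int) (X : Int) (A : List Int) : String :=
  let temp := (PySem.List.pyRange 0 N 1).foldl
    (fun (d : PySem.Dict Int (List String)) i =>
      d.modify (PySem.Int.floordiv (PySem.List.pyGetD A i 0 - 1) X) []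
        (fun l => l ++ [PySem.Int.toStr (i + 1)]))
    PySem.Dict.empty
  let result := (PySem.List.sorted temp.keys (fun k => k) false).foldl
    (fun acc k => acc ++ temp.getD k []) []
  PySem.Str.join " " result

-- ===== PORT B =====
def solve_alt (N : Int) (X : Int) (A : List Int) : String :=
  let order := PySem.List.sorted (PySem.List.pyRange 0 N 1)
    (fun i => PySem.Int.floordiv (PySem.List.pyGetD A i 0 - 1) X) false
  PySem.Str.join " " (order.map (fun i => PySem.Int.toStr (i + 1)))

-- ===== PRECONDITION & SPEC =====
-- Pre_ excludes exactly the inputs where the Python A raises: X = 0 with a nonempty range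
-- (ZeroDivisionError) or N exceeding len(A) (IndexError).
def Pre_solve (N : Int) (X : Int) (A : List Int) : Prop := 0 < N → (X ≠ 0 ∧ N ≤ (A.length : Int))
instance (N : Int) (X : Int) (A : List Int) : Decidable (Pre_solve N X A) := by unfold Pre_solve; infer_instance
def pvWitness_solve : Int × Int × List Int := (3, 10, [1, 11, 20])

def Spec_solve (N : Int) (X : Int) (A : List Int) (out : String) : Prop := out = solve_alt N X A
instance (N : Int) (X : Int) (A : List Int) (out : String) : Decidable (Spec_solve N X A out) := by unfold Spec_solve; infer_instance

-- ===== CLAIM (what is proved, stated in full; the proofs are below) =====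
def Claim_equal_solve : Prop := ∀ (N : Int) (X : Int) (A : List Int), Dom_solve N X A → Pre_solve N X A → Spec_solve N X A (solve N X A)

-- ===== LEMMAS AND PROOFS =====

theorem insertBy_nil {α : Type} (b : α → α → Bool) (x : α) :
    PySem.List.insertBy b x [] = [x] := rfl

theorem insertBy_cons_true {α : Type} (b : α → α → Bool) (x y : α) (ys : List α)
    (h : b x y = true) : PySem.List.insertBy b x (y :: ys) = x :: y :: ys := by
  simp [PySem.List.insertBy, h]

theorem insertBy_cons_false {α : Type} (b : α → α → Bool) (x y : α) (ys : List α)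
    (h : b x y = false) : PySem.List.insertBy b x (y :: ys) = y :: PySem.List.insertBy b x ys := by
  simp [PySem.List.insertBy, h]

theorem insertBy_append_left {α : Type} (b : α → α → Bool) (x : α) (l ys : List α)
    (h : ∀ y ∈ l, b x y = false) :
    PySem.List.insertBy b x (l ++ ys) = l ++ PySem.List.insertBy b x ys := by
  induction l with
  | nil => simp
  | cons z zs ih =>
      rw [List.cons_append, insertBy_cons_false b x z (zs ++ ys) (h z (by simp))]
      rw [ih (fun y hy => h y (by simp [hy])), List.cons_append]

theorem insertBy_all_true {α : Type} (b : α → α → Bool) (x : α) (ys : List α)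
    (h : ∀ y ∈ ys, b x y = true) :
    PySem.List.insertBy b x ys = x :: ys := by
  cases ys with
  | nil => rfl
  | cons z zs => exact insertBy_cons_true b x z zs (h z (by simp))

theorem flatMap_congr_mem {α β : Type} (l : List α) (g g' : α → List β)
    (h : ∀ a ∈ l, g a = g' a) : l.flatMap g = l.flatMap g' := by
  induction l with
  | nil => rfl
  | cons z zs ih =>
      simp only [List.flatMap_cons, h z (by simp), ih (fun a ha => h a (by simp [ha]))]

theorem insertBy_flatMap (f : Int → Int) (x : Int) (sk : List Int) (g : Int → List Int)
    (hs : sk.Pairwise (· < ·))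
    (hkey : ∀ k ∈ sk, ∀ i ∈ g k, f i = k)
    (hnot : f x ∉ sk → g (f x) = []) :
    PySem.List.insertBy (fun a b => decide (f a < f b)) x (sk.flatMap g)
      = (if f x ∈ sk then sk
         else PySem.List.insertBy (fun a b => decide (a < b)) (f x) sk).flatMap
          (fun k => g k ++ if f x == k then [x] else []) := by
  induction sk with
  | nil =>
      simp [hnot (by simp), insertBy_nil, PySem.List.insertBy]
  | cons k rest ih =>
      have hrest : ∀ j ∈ rest, k < j := by
        intro j hj; exact (List.pairwise_cons.mp hs).1 j hj
      rcases lt_trichotomy (f x) k with hlt | heq | hgt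
      · -- f x < k : new least key, goes in front
        have hnm : f x ∉ k :: rest := by
          intro hmem
          rcases List.mem_cons.mp hmem with h1 | h1
          · omega
          · exact absurd (hrest _ h1) (by omega)
        have hgnil : g (f x) = [] := hnot hnm
        rw [if_neg hnm]
        rw [insertBy_cons_true (fun a b => decide (a < b)) (f x) k rest (by simp [hlt])]
        have hall : ∀ y ∈ (k :: rest).flatMap g, decide (f x < f y) = true := by
          intro y hy
          rcases List.mem_flatMap.mp hy with ⟨j, hj, hyj⟩
          have := hkey j hj y hyj
          have : k ≤ f y := by
            rcases List.mem_cons.mp hj with h1 | h1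
            · omega
            · have := hrest j h1; omega
          simp; omega
        rw [insertBy_all_true _ x _ hall]
        have hne : ∀ j ∈ k :: rest, (f x == j) = false := by
          intro j hj
          rcases List.mem_cons.mp hj with h1 | h1
          · simp; omega
          · have := hrest j h1; simp; omega
        have hr : List.flatMap (fun j => g j ++ if f x == j then [x] else []) (f x :: k :: rest)
            = x :: List.flatMap g (k :: rest) := by
          simp only [List.flatMap_cons]
          rw [flatMap_congr_mem rest (fun j => g j ++ if f x == j then [x] else [])
                g (fun j hj => by simp [hne j (List.mem_cons_of_mem _ hj)])]
          simp [hgnil, hne k (by simp)]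
        rw [hr]
      · -- f x = k : append at the end of bucket k
        rw [if_pos (by simp [heq])]
        rw [List.flatMap_cons]
        have h1 : ∀ y ∈ g k, (decide (f x < f y)) = false := by
          intro y hy; have := hkey k (by simp) y hy; simp; omega
        rw [insertBy_append_left _ x (g k) (rest.flatMap g) h1]
        have h2 : ∀ y ∈ rest.flatMap g, decide (f x < f y) = true := by
          intro y hy
          rcases List.mem_flatMap.mp hy with ⟨j, hj, hyj⟩
          have := hkey j (by simp [hj]) y hyj
          have := hrest j hj
          simp; omega
        rw [insertBy_all_true _ x _ h2]
        have hne : ∀ j ∈ rest, (f x == j) = false := by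
          intro j hj; have := hrest j hj; simp; omega
        have hr : List.flatMap (fun j => g j ++ if f x == j then [x] else []) (k :: rest)
            = (g k ++ [x]) ++ List.flatMap g rest := by
          simp only [List.flatMap_cons]
          rw [flatMap_congr_mem rest (fun j => g j ++ if f x == j then [x] else [])
                g (fun j hj => by simp [hne j hj])]
          simp [heq]
        rw [hr]
        simp
      · -- k < f x : skip bucket k, recurse
        have hne : (f x == k) = false := by simp; omega
        have hmemiff : f x ∈ k :: rest ↔ f x ∈ rest := by
          constructor
          · intro h; rcases List.mem_cons.mp h with h1 | h1
            · omega
            · exact h1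
          · intro h; exact List.mem_cons_of_mem _ h
        have hnot' : f x ∉ rest → g (f x) = [] := by
          intro h; exact hnot (fun hm => h (hmemiff.mp hm))
        have ihh := ih (List.pairwise_cons.mp hs).2
          (fun j hj => hkey j (by simp [hj])) hnot'
        rw [List.flatMap_cons]
        have h1 : ∀ y ∈ g k, (decide (f x < f y)) = false := by
          intro y hy; have := hkey k (by simp) y hy; simp; omega
        rw [insertBy_append_left _ x (g k) (rest.flatMap g) h1, ihh]
        by_cases hm : f x ∈ rest
        · rw [if_pos hm, if_pos (hmemiff.mpr hm)]
          simp only [List.flatMap_cons]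
          simp [hne]
        · rw [if_neg hm, if_neg (fun h => hm (hmemiff.mp h))]
          rw [insertBy_cons_false (fun a b => decide (a < b)) (f x) k rest (by simp; omega)]
          simp only [List.flatMap_cons]
          simp [hne]

theorem sorted_append_singleton (f : Int → Int) (xs : List Int) (x : Int) :
    PySem.List.sorted (xs ++ [x]) f false
      = PySem.List.insertBy (fun a b => decide (f a < f b)) x (PySem.List.sorted xs f false) := by
  rw [PySem.List.sorted_eq_foldl_insertBy, List.foldl_append, ← PySem.List.sorted_eq_foldl_insertBy]
  rfl

theorem sorted_key_buckets (f : Int → Int) (xs : List Int) :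
    PySem.List.sorted xs f false
      = (PySem.List.sorted (PySem.Set.ofList (xs.map f)) (fun k => k) false).flatMap
          (fun k => xs.filter (fun i => f i == k)) := by
  induction xs using List.reverseRecOn with
  | nil => rfl
  | append_singleton xs x ih =>
      rw [sorted_append_singleton, ih]
      have hsk := PySem.List.sorted_ofList_pairwise_lt (xs.map f)
      have hkey : ∀ k ∈ PySem.List.sorted (PySem.Set.ofList (xs.map f)) (fun k => k) false,
          ∀ i ∈ xs.filter (fun i => f i == k), f i = k := by
        intro k _ i hi
        have := (List.mem_filter.mp hi).2
        simpa using this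
      have hnot : f x ∉ PySem.List.sorted (PySem.Set.ofList (xs.map f)) (fun k => k) false →
          xs.filter (fun i => f i == f x) = [] := by
        intro h
        rw [List.filter_eq_nil_iff]
        intro i hi hbe
        apply h
        rw [PySem.List.mem_sorted, PySem.Set.mem_ofList]
        have : f i = f x := by simpa using hbe
        rw [← this]; exact List.mem_map_of_mem hi
      rw [insertBy_flatMap f x _ _ hsk hkey hnot]
      -- keys of xs ++ [x]
      have hofl : PySem.Set.ofList ((xs ++ [x]).map f)
          = PySem.Set.add (PySem.Set.ofList (xs.map f)) (f x) := by
        rw [List.map_append]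
        simp [PySem.Set.ofList, List.foldl_append]
      by_cases hm : f x ∈ PySem.List.sorted (PySem.Set.ofList (xs.map f)) (fun k => k) false
      · have hmem : (PySem.Set.ofList (xs.map f)).contains (f x) = true := by
          rw [PySem.List.mem_sorted] at hm
          simpa using hm
        have : PySem.Set.ofList ((xs ++ [x]).map f) = PySem.Set.ofList (xs.map f) := by
          rw [hofl, PySem.Set.add, if_pos hmem]
        rw [if_pos hm, this]
        apply flatMap_congr_mem
        intro k _
        rw [List.filter_append]
        rcases eq_or_ne (f x) k with h | h <;> simp [h]
      · have hmem : (PySem.Set.ofList (xs.map f)).contains (f x) = false := by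
          rw [PySem.List.mem_sorted] at hm
          simpa using hm
        have hnm2 : ∀ i ∈ xs, f i ≠ f x := by
          intro i hi hne
          apply hm
          rw [PySem.List.mem_sorted, PySem.Set.mem_ofList, ← hne]
          exact List.mem_map_of_mem hi
        have hofl2 : PySem.Set.ofList ((xs ++ [x]).map f)
            = PySem.Set.ofList (xs.map f) ++ [f x] := by
          rw [hofl, PySem.Set.add, if_neg (by simpa using hnm2)]
        rw [if_neg hm, hofl2]
        have : PySem.List.sorted (PySem.Set.ofList (xs.map f) ++ [f x]) (fun k => k) false
            = PySem.List.insertBy (fun a b => decide (a < b)) (f x)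
                (PySem.List.sorted (PySem.Set.ofList (xs.map f)) (fun k => k) false) :=
          sorted_append_singleton (fun k => k) (PySem.Set.ofList (xs.map f)) (f x)
        rw [this]
        apply flatMap_congr_mem
        intro k _
        rw [List.filter_append]
        rcases eq_or_ne (f x) k with h | h <;> simp [h]

theorem assemble (f : Int → Int) (idx : List Int) :
    PySem.Str.join " "
      ((PySem.List.sorted
          (idx.foldl (fun (d : PySem.Dict Int (List String)) i =>
            d.modify (f i) [] (fun l => l ++ [PySem.Int.toStr (i + 1)])) PySem.Dict.empty).keys
          (fun k => k) false).foldl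
        (fun acc k => acc ++
          (idx.foldl (fun (d : PySem.Dict Int (List String)) i =>
            d.modify (f i) [] (fun l => l ++ [PySem.Int.toStr (i + 1)])) PySem.Dict.empty).getD k []) [])
    = PySem.Str.join " " ((PySem.List.sorted idx f false).map (fun i => PySem.Int.toStr (i + 1))) := by
  set temp := idx.foldl (fun (d : PySem.Dict Int (List String)) i =>
      d.modify (f i) [] (fun l => l ++ [PySem.Int.toStr (i + 1)])) PySem.Dict.empty with htemp
  have hkeys : temp.keys = PySem.Set.ofList (idx.map f) :=
    PySem.Dict.keys_foldl_modify_key idx f [] (fun _ i l => l ++ [PySem.Int.toStr (i + 1)])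
      PySem.Dict.empty
  have hfold : temp = (idx.map (fun i => (f i, PySem.Int.toStr (i + 1)))).foldl
      (fun d p => d.modify p.1 [] (fun l => l ++ [p.2])) PySem.Dict.empty :=
    (@List.foldl_map _ _ _ (fun i => (f i, PySem.Int.toStr (i + 1)))
      (fun d p => d.modify p.1 [] (fun l => l ++ [p.2])) idx PySem.Dict.empty).symm
  have hgetD : ∀ k, temp.getD k []
      = (idx.filter (fun i => f i == k)).map (fun i => PySem.Int.toStr (i + 1)) := by
    intro k
    rw [hfold, PySem.Dict.getD_foldl_modify_append]
    rw [List.filter_map, List.map_map]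
    rfl
  rw [hkeys]
  rw [PySem.List.foldl_append_eq_flatMap (fun k => temp.getD k []) _ []]
  rw [List.nil_append]
  congr 1
  rw [flatMap_congr_mem _ _ _ (fun k _ => hgetD k)]
  rw [sorted_key_buckets f idx]
  rw [List.map_flatMap]

theorem solve_eq_alt (N : Int) (X : Int) (A : List Int) : solve N X A = solve_alt N X A := by
  unfold solve solve_alt
  exact assemble (fun i => PySem.Int.floordiv (PySem.List.pyGetD A i 0 - 1) X)
    (PySem.List.pyRange 0 N 1)

-- ===== VERDICT (by name: the statement is the Claim_ definition above) =====
theorem solve_spec : Claim_equal_solve := by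
  intro N X A _ _
  unfold Spec_solve
  exact solve_eq_alt N X A
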